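-- pv_equiv track=rewrite | github.com/GopinathAchuthan/Leetcode_Problems | InterviewBit Problems/Arrays/Minimum Lights to Activate.py | solve
-- ===== SOURCE A (Python) =====
-- def solve(A, B):
--     n = len(A)
--     left, right = 0, min(B-1, n-1)
--     pos, count = -1, 0
--     last = 0
--
--     while(last<n):
--         pos = -1
--         for i in range(right,left-1,-1):
--             if A[i] == 1:
--                 pos = i
--                 break
--
--         if pos == -1:
--             return -1
--
--         count +=1
--         last = pos+B
--         left, right = pos+1, min(n-1, pos+2*B-1)
--
--     return count
-- ===== SOURCE B (Python) =====
-- def solve(A, B):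
--     n = len(A)
--     # nearest[i] = largest j <= i with A[j] == 1, or -1 if none
--     nearest = [-1] * n
--     last1 = -1
--     for i, v in enumerate(A):
--         if v == 1:
--             last1 = i
--         nearest[i] = last1
--     need, count = 0, 0
--     while need < n:
--         r = min(need + B - 1, n - 1)
--         l = max(0, need - B + 1)
--         p = nearest[r] if r >= 0 else -1
--         if p < l:
--             return -1
--         count += 1
--         need = p + B
--     return count
-- ===== Notes on version B (the rewrite author's own statement) =====
-- stated objective: alternative
-- what changed: Replaces A's per-step backward window scan for the rightmost lit bulb with a single precomputed nearest-left-one array, so each greedy step is one array lookup instead of a window scan.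
import Mathlib
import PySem

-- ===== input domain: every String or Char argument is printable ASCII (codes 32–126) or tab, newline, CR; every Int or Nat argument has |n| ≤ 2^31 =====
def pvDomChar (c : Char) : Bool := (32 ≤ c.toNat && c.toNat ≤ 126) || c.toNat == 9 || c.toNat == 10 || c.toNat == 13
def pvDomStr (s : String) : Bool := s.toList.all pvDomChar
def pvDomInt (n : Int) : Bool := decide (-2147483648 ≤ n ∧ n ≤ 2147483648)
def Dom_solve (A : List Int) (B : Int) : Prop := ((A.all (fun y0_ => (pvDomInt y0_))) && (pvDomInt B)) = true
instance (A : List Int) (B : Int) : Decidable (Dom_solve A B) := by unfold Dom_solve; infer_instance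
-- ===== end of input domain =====

-- B replaces A's backward window scan per greedy step with one precomputed
-- nearest-left-'1' array queried once per greedy step (objective: alternative).

-- ===== PORT A =====
-- A's inner 'for i in range(right, left-1, -1): if A[i] == 1: pos = i; break'
def findPos (AL : List Int) (i stop : Int) : Int :=
  if h : stop ≤ i then
    if (PySem.List.pyGet? AL i).getD 0 = 1 then i else findPos AL (i - 1) stop
  else -1
termination_by (i + 1 - stop).toNat
decreasing_by
  rw [sub_add_cancel]
  exact (Int.toNat_lt_toNat (Int.sub_pos.mpr (Int.lt_add_one_iff.mpr h))).mpr
    (sub_lt_sub_right (lt_add_one i) stop)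

-- result bounds, needed by solveLoopA's termination proof
theorem findPos_bounds (AL : List Int) (i stop : Int) :
    findPos AL i stop = -1 ∨ (stop ≤ findPos AL i stop ∧ findPos AL i stop ≤ i) := by
  fun_induction findPos AL i stop with
  | case1 i h hc => exact Or.inr ⟨h, le_refl i⟩
  | case2 i h hc ih =>
    rcases ih with h1 | h1
    · exact Or.inl h1
    · exact Or.inr ⟨h1.1, le_trans h1.2 (le_of_lt (sub_lt_self i one_pos))⟩
  | case3 i h => exact Or.inl rfl

-- A's while loop; the Prop argument is the loop invariant, used only for termination
def solveLoopA (AL : List Int) (n B last left right count : Int)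
    (h : last ≤ left + B - 1 ∨ (last = 0 ∧ left = 0 ∧ right ≤ B - 1)) : Int :=
  if hl : last < n then
    let pos := findPos AL right left
    if hp : pos = -1 then -1
    else solveLoopA AL n B (pos + B) (pos + 1) (min (n - 1) (pos + 2 * B - 1)) (count + 1)
      (Or.inl (le_of_eq (by rw [add_right_comm, add_sub_cancel_right])))
  else count
termination_by (n - last).toNat
decreasing_by
  have hb := (findPos_bounds AL right left).resolve_left hp
  refine (Int.toNat_lt_toNat (Int.sub_pos.mpr hl)).mpr (sub_lt_sub_left ?_ n)
  rcases h with hi | ⟨e1, e2, e3⟩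
  · have h4 : left + B ≤ findPos AL right left + B := add_le_add hb.1 le_rfl
    exact lt_of_le_of_lt (le_trans hi (sub_le_sub_right h4 1)) (sub_lt_self _ one_pos)
  · have hp0 : (0 : Int) ≤ findPos AL right left := by rw [← e2]; exact hb.1
    have hB : (0 : Int) < B := lt_of_le_of_lt (le_trans hp0 (le_trans hb.2 e3)) (sub_lt_self _ one_pos)
    exact lt_of_le_of_lt (le_of_eq e1) (add_pos_of_nonneg_of_pos hp0 hB)

def solve (A : List Int) (B : Int) : Int :=
  solveLoopA A A.length B 0 0 (min (B - 1) ((A.length : Int) - 1)) 0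
    (Or.inr ⟨rfl, rfl, min_le_left _ _⟩)

-- ===== PORT B =====
-- Source B's forward pass building nearest[i] = last index j ≤ i with A[j] == 1, else -1
def buildNear : List Int → Int → Int → List Int
  | [], _, _ => []
  | v :: t, idx, last1 =>
      (if v = 1 then idx else last1) :: buildNear t (idx + 1) (if v = 1 then idx else last1)

-- Source B's while loop: one array lookup per greedy step
def solveLoopB (near : List Int) (n B need count : Int) : Int :=
  if hl : need < n then
    let r := min (need + B - 1) (n - 1)
    let l := max 0 (need - B + 1)
    let p := if 0 ≤ r then (PySem.List.pyGet? near r).getD (-1) else -1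
    if hp : p < l then -1 else solveLoopB near n B (p + B) (count + 1)
  else count
termination_by (n - need).toNat
decreasing_by
  have h2 : need - B + 1 ≤ p := le_trans (le_max_right 0 (need - B + 1)) (not_lt.mp hp)
  have h3 : need - B + 1 + B ≤ p + B := add_le_add h2 le_rfl
  have e : need - B + 1 + B = need + 1 := by rw [sub_add_eq_add_sub, sub_add_cancel]
  have h4 : need + 1 ≤ p + B := by rw [← e]; exact h3
  refine (Int.toNat_lt_toNat (Int.sub_pos.mpr hl)).mpr (sub_lt_sub_left ?_ n)
  exact lt_of_lt_of_le (lt_add_one need) h4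

def solve_alt (A : List Int) (B : Int) : Int :=
  solveLoopB (buildNear A 0 (-1)) A.length B 0 0

-- ===== PRECONDITION & SPEC =====
def Spec_solve (A : List Int) (B : Int) (out : Int) : Prop := out = solve_alt A B
instance (A : List Int) (B : Int) (out : Int) : Decidable (Spec_solve A B out) := by unfold Spec_solve; infer_instance

-- ===== CLAIM (what is proved, stated in full; the proofs are below) =====
def Claim_equal_solve : Prop := ∀ (A : List Int) (B : Int), Dom_solve A B → Spec_solve A B (solve A B)

-- ===== LEMMAS AND PROOFS =====

theorem findPos_neg (AL : List Int) (i stop : Int) (h : i < stop) : findPos AL i stop = -1 := by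
  rw [findPos, dif_neg (by omega)]

-- the nearest array holds exactly A's backward scan down to 0
theorem buildNear_get (AL : List Int) : ∀ (t pre : List Int), AL = pre ++ t →
    ∀ (k : Nat), k < t.length →
    (buildNear t (pre.length : Int) (findPos AL ((pre.length : Int) - 1) 0))[k]? =
      some (findPos AL ((pre.length : Int) + k) 0) := by
  intro t
  induction t with
  | nil => intro pre _ k hk; simp at hk
  | cons v tt ih =>
    intro pre hAL k hk
    have hv : findPos AL (pre.length : Int) 0 =
        if v = 1 then (pre.length : Int) else findPos AL ((pre.length : Int) - 1) 0 := by
      rw [findPos, dif_pos (by omega : (0:Int) ≤ (pre.length : Int))]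
      rw [hAL, PySem.List.pyGet?_append_length]
      rfl
    cases k with
    | zero =>
      simp only [buildNear, List.getElem?_cons_zero, Nat.cast_zero, add_zero]
      rw [hv]
    | succ k =>
      simp only [buildNear, List.getElem?_cons_succ]
      have hAL' : AL = (pre ++ [v]) ++ tt := by simp [hAL]
      have h2 := ih (pre ++ [v]) hAL' k (by simpa using hk)
      have e0 : (((pre ++ [v]).length : Nat) : Int) = (pre.length : Int) + 1 := by simp
      rw [e0] at h2
      have e1 : ((pre.length : Int) + 1 - 1) = (pre.length : Int) := by ring
      rw [e1, hv] at h2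
      have e2 : ((pre.length : Int) + ((k + 1 : Nat) : Int)) = (pre.length : Int) + 1 + (k : Int) := by
        push_cast; ring
      rw [e2]
      exact h2

theorem near_lookup (AL : List Int) (r : Int) (h0 : 0 ≤ r) (hn : r < (AL.length : Int)) :
    PySem.List.pyGet? (buildNear AL 0 (-1)) r = some (findPos AL r 0) := by
  have hneg : findPos AL (((([] : List Int).length : Nat) : Int) - 1) 0 = -1 :=
    findPos_neg AL _ 0 (by simp)
  have hg := buildNear_get AL AL [] rfl r.toNat (by omega)
  rw [hneg] at hg
  simp only [List.length_nil, Nat.cast_zero, zero_add] at hg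
  have hr' : r = (r.toNat : Int) := by omega
  rw [hr', PySem.List.pyGet?_natCast, hg]

-- the windowed scan in terms of the unbounded scan
theorem findPos_stop (AL : List Int) (l : Int) (hl : 0 ≤ l) :
    ∀ (m : Nat) (i : Int), i + 1 ≤ (m : Int) →
    findPos AL i l = if l ≤ findPos AL i 0 then findPos AL i 0 else -1 := by
  intro m
  induction m with
  | zero =>
    intro i hi
    rw [findPos_neg AL i l (by omega), findPos_neg AL i 0 (by omega), if_neg (by omega)]
  | succ m ih =>
    intro i hi
    by_cases hneg : i < 0
    · rw [findPos_neg AL i l (by omega), findPos_neg AL i 0 (by omega), if_neg (by omega)]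
    · have hunf : findPos AL i 0 =
          if (PySem.List.pyGet? AL i).getD 0 = 1 then i else findPos AL (i - 1) 0 := by
        rw [findPos, dif_pos (by omega : (0:Int) ≤ i)]
      rw [hunf]
      conv_lhs => rw [findPos]
      by_cases hc : (PySem.List.pyGet? AL i).getD 0 = 1
      · simp only [if_pos hc]
        by_cases hli : l ≤ i
        · rw [dif_pos hli, if_pos hli]
        · rw [dif_neg hli, if_neg hli]
      · simp only [if_neg hc]
        have hq := findPos_bounds AL (i - 1) 0
        by_cases hli : l ≤ i
        · rw [dif_pos hli]
          exact ih (i - 1) (by omega)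
        · rw [dif_neg hli, if_neg (by rcases hq with h | h <;> omega)]

-- one-step and stop unfoldings of the two loops, in rewrite-friendly form
theorem loopA_stop (AL : List Int) (n B last left right count : Int)
    (h : last ≤ left + B - 1 ∨ (last = 0 ∧ left = 0 ∧ right ≤ B - 1)) (hl : ¬ last < n) :
    solveLoopA AL n B last left right count h = count := by
  rw [solveLoopA, dif_neg hl]

theorem loopA_step (AL : List Int) (n B last left right count : Int)
    (h : last ≤ left + B - 1 ∨ (last = 0 ∧ left = 0 ∧ right ≤ B - 1)) (hl : last < n)
    (pos : Int) (hpos : pos = findPos AL right left) :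
    solveLoopA AL n B last left right count h =
      if _hp : pos = -1 then -1
      else solveLoopA AL n B (pos + B) (pos + 1) (min (n - 1) (pos + 2 * B - 1)) (count + 1)
        (Or.inl (by omega)) := by
  subst hpos
  rw [solveLoopA, dif_pos hl]

theorem loopB_stop (near : List Int) (n B need count : Int) (hl : ¬ need < n) :
    solveLoopB near n B need count = count := by
  rw [solveLoopB, dif_neg hl]

theorem loopB_step (near : List Int) (n B need count : Int) (hl : need < n)
    (r l p : Int) (hr : r = min (need + B - 1) (n - 1)) (hll : l = max 0 (need - B + 1))
    (hp : p = if 0 ≤ r then (PySem.List.pyGet? near r).getD (-1) else -1) :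
    solveLoopB near n B need count =
      if _hp : p < l then -1 else solveLoopB near n B (p + B) (count + 1) := by
  subst hr hll hp
  rw [solveLoopB, dif_pos hl]

-- main loop correspondence, for B ≥ 1
theorem loop_eq (AL : List Int) (B : Int) (hB : 1 ≤ B) :
    ∀ (m : Nat) (last left right count : Int), 0 ≤ last →
    left = max 0 (last - B + 1) → right = min ((AL.length : Int) - 1) (last + B - 1) →
    ((AL.length : Int) - last).toNat ≤ m →
    ∀ h, solveLoopA AL AL.length B last left right count h
      = solveLoopB (buildNear AL 0 (-1)) AL.length B last count := by
  intro m
  induction m with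
  | zero =>
    intro last left right count h0 hle hri hm h
    rw [loopA_stop AL _ B last left right count h (by omega),
        loopB_stop (buildNear AL 0 (-1)) _ B last count (by omega)]
  | succ m ih =>
    intro last left right count h0 hle hri hm h
    set n : Int := (AL.length : Int) with hn
    by_cases hl : last < n
    · set l : Int := max 0 (last - B + 1) with hldef
      set r : Int := min (last + B - 1) (n - 1) with hrdef
      have hrr : right = r := by omega
      by_cases hr0 : 0 ≤ r
      · have hlook := near_lookup AL r hr0 (by omega)
        have hpb := findPos_bounds AL r 0
        have hstop : findPos AL right left = if l ≤ findPos AL r 0 then findPos AL r 0 else -1 := by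
          rw [hrr, hle]
          exact findPos_stop AL l (by omega) (r + 1).toNat r (by omega)
        rw [loopA_step AL n B last left right count h hl _ hstop.symm,
            loopB_step (buildNear AL 0 (-1)) n B last count hl r l (findPos AL r 0)
              hrdef hldef (by rw [if_pos hr0, hlook]; rfl)]
        by_cases hlp : l ≤ findPos AL r 0
        · have hp0 : 0 ≤ findPos AL r 0 := by rcases hpb with h' | h' <;> omega
          simp only [if_pos hlp]
          rw [dif_neg (by omega : ¬ findPos AL r 0 = -1), dif_neg (by omega : ¬ findPos AL r 0 < l)]
          exact ih (findPos AL r 0 + B) (findPos AL r 0 + 1)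
            (min (n - 1) (findPos AL r 0 + 2 * B - 1)) (count + 1)
            (by omega) (by omega) (by omega) (by omega) _
        · simp only [if_neg hlp]
          rw [dif_pos trivial, dif_pos (by rcases hpb with h' | h' <;> omega)]
      · have hfp : findPos AL right left = -1 := by
          rw [hrr, hle]; exact findPos_neg AL r l (by omega)
        rw [loopA_step AL n B last left right count h hl _ hfp.symm,
            loopB_step (buildNear AL 0 (-1)) n B last count hl r l (-1)
              hrdef hldef (by rw [if_neg hr0])]
        rw [dif_pos rfl, dif_pos (by omega : (-1 : Int) < l)]
    · rw [loopA_stop AL n B last left right count h hl,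
          loopB_stop (buildNear AL 0 (-1)) n B last count hl]

-- ===== VERDICT (by name: the statement is the Claim_ definition above) =====
theorem solve_spec : Claim_equal_solve := by
  intro A B _
  unfold Spec_solve solve solve_alt
  by_cases hB : 1 ≤ B
  · exact loop_eq A B hB ((A.length : Int) + 1).toNat 0 0 (min (B - 1) ((A.length : Int) - 1)) 0
      (by omega) (by omega) (by omega) (by omega) _
  · by_cases hn : (0 : Int) < (A.length : Int)
    · have hfp : findPos A (min (B - 1) ((A.length : Int) - 1)) 0 = -1 :=
        findPos_neg A _ 0 (by omega)
      rw [loopA_step A (A.length : Int) B 0 0 (min (B - 1) ((A.length : Int) - 1)) 0 _ hn _ hfp.symm,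
          loopB_step (buildNear A 0 (-1)) (A.length : Int) B 0 0 hn
            (min (0 + B - 1) ((A.length : Int) - 1)) (max 0 (0 - B + 1)) (-1)
            rfl rfl (by rw [if_neg (by omega)])]
      rw [dif_pos rfl, dif_pos (by omega : (-1 : Int) < max 0 (0 - B + 1))]
    · rw [loopA_stop A (A.length : Int) B 0 0 (min (B - 1) ((A.length : Int) - 1)) 0 _ hn,
          loopB_stop (buildNear A 0 (-1)) (A.length : Int) B 0 0 hn]
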